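-- pv_equiv track=rewrite | github.com/renat3424/Machine-learning-and-image-processing | computer graphics/objprocess/hw1.py | vertexmax
-- ===== SOURCE A (Python) =====
-- def vertexmax(vertexes, faces):#вершина, которая принадлежит максимальному количеству граней
--     vertexnum=[]#номера вершины
--     numoftimes=0#количество вершин
--
--     for i in range(0, len(vertexes)):#проходим через вершины
--         numoftimes1 = 0
--         for face in faces:
--             for j in range(0, len(face)):#проверяем принадлежит ли вершина данной грани
--                 if face[j]==i+1:
--                     numoftimes1=numoftimes1+1#если принадлежит увеличивем количество граней содержащих вершину
--                     break
--         if numoftimes<=numoftimes1:#выбираем максимальное количество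
--             if numoftimes==numoftimes1:
--                 vertexnum.append(i)
--             else:
--                 numoftimes=numoftimes1
--                 vertexnum=[]
--                 vertexnum.append(i)
--     return (vertexnum,numoftimes)#возвращаем номер вершины и количество граней которые ее содержат
-- ===== SOURCE B (Python) =====
-- def vertexmax(vertexes, faces):
--     # One pass over faces builds a membership-count table; then a separate
--     # max pass and a filter pass over vertex indices.
--     counts = {}
--     for face in faces:
--         for v in set(face):
--             counts[v] = counts.get(v, 0) + 1
--     best = 0
--     for i in range(len(vertexes)):
--         c = counts.get(i + 1, 0)
--         if c > best:
--             best = c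
--     result = [i for i in range(len(vertexes)) if counts.get(i + 1, 0) == best]
--     return (result, best)
-- ===== Notes on version B (the rewrite author's own statement) =====
-- stated objective: faster
-- what changed: Replaced A's vertex-outer/face-inner quadratic scan by a single pass over faces building a count dictionary, followed by a max pass and a filter pass over vertex indices.
import Mathlib
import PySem

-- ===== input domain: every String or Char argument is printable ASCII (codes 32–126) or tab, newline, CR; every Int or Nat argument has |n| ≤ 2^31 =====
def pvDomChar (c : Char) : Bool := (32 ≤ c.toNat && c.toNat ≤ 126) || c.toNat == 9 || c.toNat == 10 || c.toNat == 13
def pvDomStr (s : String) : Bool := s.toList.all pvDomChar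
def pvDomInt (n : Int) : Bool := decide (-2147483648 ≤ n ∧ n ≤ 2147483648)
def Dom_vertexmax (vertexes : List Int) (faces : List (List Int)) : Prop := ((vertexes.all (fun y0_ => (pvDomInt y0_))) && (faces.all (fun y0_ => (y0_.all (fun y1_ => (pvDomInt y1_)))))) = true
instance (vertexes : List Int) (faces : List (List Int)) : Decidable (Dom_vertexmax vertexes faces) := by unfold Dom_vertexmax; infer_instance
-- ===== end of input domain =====

-- B replaces A's vertex-outer/face-inner scan by one counting pass over faces plus a max pass and a filter pass (faster).


-- ===== PORT A =====
-- inner 'for j … if face[j]==i+1: count+=1; break' loop: returns 1 at the first hit, else 0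
def faceHit (t : Int) : List Int → Int
  | [] => 0
  | x :: xs => if x = t then 1 else faceHit t xs

def vertexmax (vertexes : List Int) (faces : List (List Int)) : List Int × Int :=
  (PySem.List.pyRange 0 (vertexes.length : Int) 1).foldl
    (fun st i =>
      let numoftimes1 := faces.foldl (fun n face => n + faceHit (i + 1) face) 0
      if st.2 ≤ numoftimes1 then
        if st.2 = numoftimes1 then (st.1 ++ [i], st.2)
        else ([i], numoftimes1)
      else st)
    ([], 0)

-- ===== PORT B =====
def vertexmax_alt (vertexes : List Int) (faces : List (List Int)) : List Int × Int :=
  let counts : PySem.Dict Int Int :=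
    faces.foldl (fun d face => (PySem.Set.ofList face).foldl (fun d v => d.modify v 0 (· + 1)) d)
      PySem.Dict.empty
  let best : Int :=
    (PySem.List.pyRange 0 (vertexes.length : Int) 1).foldl
      (fun b i => if counts.getD (i + 1) 0 > b then counts.getD (i + 1) 0 else b) 0
  ((PySem.List.pyRange 0 (vertexes.length : Int) 1).filter
      (fun i => counts.getD (i + 1) 0 == best),
   best)

-- ===== PRECONDITION & SPEC =====
def Spec_vertexmax (vertexes : List Int) (faces : List (List Int)) (out : List Int × Int) : Prop := out = vertexmax_alt vertexes faces
instance (vertexes : List Int) (faces : List (List Int)) (out : List Int × Int) : Decidable (Spec_vertexmax vertexes faces out) := by unfold Spec_vertexmax; infer_instance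

-- ===== CLAIM (what is proved, stated in full; the proofs are below) =====
def Claim_equal_vertexmax : Prop := ∀ (vertexes : List Int) (faces : List (List Int)), Dom_vertexmax vertexes faces → Spec_vertexmax vertexes faces (vertexmax vertexes faces)

-- ===== LEMMAS AND PROOFS =====

-- the per-vertex count both sides compute: number of faces containing t
def hitCount (t : Int) (faces : List (List Int)) : Int :=
  faces.foldl (fun n face => n + (if t ∈ face then 1 else 0)) 0

theorem faceHit_eq (t : Int) (f : List Int) : faceHit t f = if t ∈ f then 1 else 0 := by
  induction f with
  | nil => simp [faceHit]
  | cons x xs ih =>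
    by_cases h : x = t
    · simp [faceHit, h]
    · have h' : ¬ t = x := fun e => h e.symm
      simp [faceHit, h, ih, h']

theorem countA_eq (t : Int) (faces : List (List Int)) :
    faces.foldl (fun n face => n + faceHit t face) 0 = hitCount t faces := by
  unfold hitCount
  congr 1
  funext n face
  rw [faceHit_eq]

theorem counts_getD (faces : List (List Int)) (d : PySem.Dict Int Int) (t : Int) :
    (faces.foldl (fun d face => (PySem.Set.ofList face).foldl (fun d v => d.modify v 0 (· + 1)) d) d).getD t 0
      = d.getD t 0 + hitCount t faces := by
  induction faces generalizing d with
  | nil => simp [hitCount]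
  | cons f fs ih =>
    rw [List.foldl_cons, ih]
    have hset : ((PySem.Set.ofList f).foldl (fun d v => d.modify v 0 (· + 1)) d).getD t 0
        = d.getD t 0 + (if t ∈ f then 1 else 0) := by
      rw [PySem.Dict.getD_foldl_modify_add_one]
      by_cases h : t ∈ f
      · rw [List.count_eq_one_of_mem (PySem.Set.nodup_ofList f) ((PySem.Set.mem_ofList f t).2 h)]
        simp [h]
      · rw [List.count_eq_zero_of_not_mem (fun hc => h ((PySem.Set.mem_ofList f t).1 hc))]
        simp [h]
    rw [hset]
    have shift : ∀ (l : List (List Int)) (a : Int),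
        l.foldl (fun n face => n + (if t ∈ face then 1 else 0)) a
          = a + l.foldl (fun n face => n + (if t ∈ face then 1 else 0)) 0 := by
      intro l
      induction l with
      | nil => intro a; simp
      | cons x xs ihx =>
        intro a
        rw [List.foldl_cons, ihx, List.foldl_cons, ihx (0 + _)]
        ring
    simp only [hitCount, List.foldl_cons, zero_add]
    rw [shift fs (if t ∈ f then 1 else 0)]
    ring

-- the generic loop equivalence over range(n), with an arbitrary count function c
def bestOf (c : Int → Int) (l : List Int) : Int :=
  l.foldl (fun b i => if c i > b then c i else b) 0

theorem le_bestOf (c : Int → Int) (l : List Int) : ∀ i ∈ l, c i ≤ bestOf c l := by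
  have key : ∀ (l : List Int) (b : Int),
      (∀ i ∈ l, c i ≤ l.foldl (fun b i => if c i > b then c i else b) b)
      ∧ b ≤ l.foldl (fun b i => if c i > b then c i else b) b := by
    intro l
    induction l with
    | nil => intro b; simp
    | cons x xs ih =>
      intro b
      constructor
      · intro i hi
        rcases List.mem_cons.1 hi with h | h
        · subst h
          refine le_trans ?_ (ih _).2
          dsimp only; split <;> omega
        · exact (ih _).1 i h
      · refine le_trans ?_ (ih _).2
        dsimp only; split <;> omega
  intro i hi
  exact (key l 0).1 i hi

theorem bestOf_append (c : Int → Int) (l : List Int) (x : Int) :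
    bestOf c (l ++ [x]) = if c x > bestOf c l then c x else bestOf c l := by
  unfold bestOf
  rw [List.foldl_append]
  rfl

theorem loop_eq (c : Int → Int) (n : ℕ) :
    ((List.range n).map (Nat.cast : ℕ → Int)).foldl
      (fun st i =>
        if st.2 ≤ c i then
          if st.2 = c i then (st.1 ++ [i], st.2) else ([i], c i)
        else st)
      ([], 0)
    = (((List.range n).map (Nat.cast : ℕ → Int)).filter
        (fun i => c i == bestOf c ((List.range n).map (Nat.cast : ℕ → Int))),
       bestOf c ((List.range n).map (Nat.cast : ℕ → Int))) := by
  induction n with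
  | zero => simp [bestOf]
  | succ n ih =>
    have hr : (List.range (n+1)).map (Nat.cast : ℕ → Int)
        = (List.range n).map (Nat.cast : ℕ → Int) ++ [(n : Int)] := by
      rw [List.range_succ, List.map_append]; rfl
    set l := (List.range n).map (Nat.cast : ℕ → Int) with hl
    rw [hr, List.foldl_append, ih, bestOf_append]
    simp only [List.foldl_cons, List.foldl_nil]
    by_cases hgt : c (n : Int) > bestOf c l
    · -- strictly larger: reset
      have h1 : ¬ bestOf c l = c (n : Int) := by omega
      have h2 : bestOf c l ≤ c (n : Int) := by omega
      simp only [if_pos h2, if_neg h1, if_pos hgt, Prod.mk.injEq]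
      constructor
      · rw [List.filter_append]
        have hnil : l.filter (fun i => c i == c (n : Int)) = [] := by
          rw [List.filter_eq_nil_iff]
          intro i hi
          have := le_bestOf c l i hi
          simp only [beq_iff_eq]
          omega
        rw [hnil]
        simp
      · trivial
    · -- not larger
      simp only [if_neg hgt]
      by_cases heq : bestOf c l = c (n : Int)
      · have h2 : bestOf c l ≤ c (n : Int) := le_of_eq heq
        simp only [if_pos h2, if_pos heq, Prod.mk.injEq]
        constructor
        · rw [List.filter_append]
          simp [heq]
        · trivial
      · have h2 : ¬ bestOf c l ≤ c (n : Int) := by omega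
        simp only [if_neg h2, Prod.mk.injEq]
        constructor
        · have hx : (c (n : Int) == bestOf c l) = false := by
            simp only [beq_eq_false_iff_ne]
            exact fun e => heq e.symm
          rw [List.filter_append]
          simp [hx]
        · trivial

-- ===== VERDICT (by name: the statement is the Claim_ definition above) =====
theorem vertexmax_spec : Claim_equal_vertexmax := by
  intro vertexes faces _
  unfold Spec_vertexmax vertexmax vertexmax_alt
  have hc : ∀ i : Int,
      (faces.foldl (fun d face => (PySem.Set.ofList face).foldl (fun d v => d.modify v 0 (· + 1)) d)
        PySem.Dict.empty).getD (i + 1) 0 = hitCount (i + 1) faces := by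
    intro i
    rw [counts_getD]
    norm_num [PySem.Dict.empty, PySem.Dict.getD, PySem.Dict.get?]
  have hrange : PySem.List.pyRange 0 (vertexes.length : Int) 1
      = (List.range vertexes.length).map (Nat.cast : ℕ → Int) := by
    simpa using PySem.List.pyRange_zero_natCast vertexes.length
  simp only [hrange, hc, countA_eq]
  exact loop_eq (fun i => hitCount (i + 1) faces) vertexes.length
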